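-- pv_equiv track=rewrite | github.com/JDaniloC/Individual-DiffAlgorithm | patience.py | devolveUnicos
-- ===== SOURCE A (Python) =====
-- def removeDuplicadas(lista):
--     # lista = [x for x in primeiro if lista.count(x) == 1]
--     lista = lista[:]
--     indices = [x for x in range(len(lista))]
--
--     i = 0
--     while i < len(lista):
--         if lista[i] in lista[i + 1:]:
--             j = i + 1
--             while j < len(lista):
--                 if lista[j] == lista[i]:
--                     lista.pop(j)
--                     indices.pop(j)
--                     j -= 1
--                 j += 1
--             lista.pop(i)
--             indices.pop(i)
--             i -= 1
--         i += 1
--     return lista, indices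
--
-- def devolveUnicos(primeiro, segundo):
--     primeiro, indicesA = removeDuplicadas(primeiro)
--     segundo, indicesB = removeDuplicadas(segundo)
--
--     if len(primeiro) > 0 and len(segundo) > 0:
--
--         # Verifica se os elementos de A estão em B e reorganiza os índices
--         i = 0
--         while i < len(primeiro):
--             j = i
--             verificador = False
--             while j < len(segundo):
--                 if primeiro[i] == segundo[j]:
--                     verificador = True
--                     segundo[i], segundo[j] = segundo[j], segundo[i]
--                     indicesB[i], indicesB[j] = indicesB[j], indicesB[i]
--                     break
--                 j += 1
--             if not verificador:
--                 primeiro.pop(i)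
--                 i -= 1
--             i += 1
--
--         if i < len(segundo) - 1:
--             segundo = segundo[:i]
--             indicesB = indicesB[:i]
--
--         if len(primeiro) > 1:
--             return indicesA, indicesB
--     return None
-- ===== SOURCE B (Python) =====
-- from collections import Counter
--
-- def devolveUnicos(primeiro, segundo):
--     c1 = Counter(primeiro)
--     c2 = Counter(segundo)
--     ia = [i for i, x in enumerate(primeiro) if c1[x] == 1]
--     pos2 = {x: i for i, x in enumerate(segundo) if c2[x] == 1}
--     ib = [pos2[primeiro[i]] for i in ia if c2[primeiro[i]] == 1]
--     if len(ib) > 1: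
--         return ia, ib
--     return None
-- ===== Notes on version B (the rewrite author's own statement) =====
-- stated objective: faster
-- what changed: Replaces the quadratic pop-and-swap machinery (O(n^2) duplicate removal by repeated list.pop, then an O(k*m) swap-based alignment loop) with one pass of Counters and a value-to-position dict, building the unique-index lists and the aligned index list directly by comprehensions.
-- intended difference: When the number k of common unique elements satisfies k>=2 and k equals len(unique(segundo))-1, A's off-by-one guard 'if i < len(segundo)-1' skips the truncation and A returns an indicesB list with a dangling extra index of the one unmatched element of segundo, while B returns exactly the k aligned indices, which is the intended result (A itself truncates to k in every other case). — e.g. on devolveUnicos([1, 2], [1, 2, 3]): A returns some ([0, 1], [0, 1, 2]), B returns some ([0, 1], [0, 1])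
import Mathlib
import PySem

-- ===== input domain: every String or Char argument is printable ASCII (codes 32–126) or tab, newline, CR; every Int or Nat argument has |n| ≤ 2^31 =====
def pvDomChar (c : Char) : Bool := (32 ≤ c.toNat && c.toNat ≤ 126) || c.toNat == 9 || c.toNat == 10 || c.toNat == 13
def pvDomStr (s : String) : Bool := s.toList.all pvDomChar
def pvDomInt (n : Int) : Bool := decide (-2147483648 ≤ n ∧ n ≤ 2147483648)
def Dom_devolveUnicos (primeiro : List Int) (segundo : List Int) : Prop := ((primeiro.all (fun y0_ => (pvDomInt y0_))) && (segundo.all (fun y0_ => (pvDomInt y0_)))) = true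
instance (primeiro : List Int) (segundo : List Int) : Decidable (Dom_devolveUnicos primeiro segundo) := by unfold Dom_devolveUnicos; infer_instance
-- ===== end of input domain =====

-- B replaces A's quadratic pop/swap loops with Counters and a value->position dict (one pass);
-- A's return value only is compared (A never mutates its arguments observably).

-- ===== PORT A =====
-- inner while of removeDuplicadas: while j < len(lista): if lista[j]==v: pop j (from both) else j+=1
-- (fuel bounds the iteration count; it is never exhausted for the initial fuel = lista.length, proved below.
--  lista.pop(j) for 0 <= j < len is List.eraseIdx; lista[j] in range is List.getD.)
def rdInner : Nat → Int → List Int → List Int → Nat → List Int × List Int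
  | 0, _, lista, indices, _ => (lista, indices)
  | fuel+1, v, lista, indices, j =>
    if j < lista.length then
      if lista.getD j 0 == v then rdInner fuel v (lista.eraseIdx j) (indices.eraseIdx j) j
      else rdInner fuel v lista indices (j+1)
    else (lista, indices)

-- outer while of removeDuplicadas (lista[i+1:] for 0 <= i+1 is List.drop (i+1))
def rdOuter : Nat → List Int → List Int → Nat → List Int × List Int
  | 0, lista, indices, _ => (lista, indices)
  | fuel+1, lista, indices, i =>
    if i < lista.length then
      if (lista.drop (i+1)).contains (lista.getD i 0) then
        let r := rdInner lista.length (lista.getD i 0) lista indices (i+1)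
        rdOuter fuel (r.1.eraseIdx i) (r.2.eraseIdx i) i      -- pop(i); i -= 1; i += 1
      else rdOuter fuel lista indices (i+1)
    else (lista, indices)

def removeDuplicadas (lista : List Int) : List Int × List Int :=
  rdOuter (2 * lista.length + 1) lista (PySem.List.pyRange 0 lista.length 1) 0

-- Python's tuple swap segundo[i],segundo[j] = segundo[j],segundo[i] (indices in range)
def pySwap (l : List Int) (i j : Nat) : List Int := (l.set i (l.getD j 0)).set j (l.getD i 0)

-- inner while of devolveUnicos: scan j from i for primeiro[i] in segundo; swap + break on hit
def duFind : Nat → Int → List Int → List Int → Nat → Nat → List Int × List Int × Bool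
  | 0, _, seg, ixB, _, _ => (seg, ixB, false)
  | fuel+1, v, seg, ixB, i, j =>
    if j < seg.length then
      if seg.getD j 0 == v then (pySwap seg i j, pySwap ixB i j, true)
      else duFind fuel v seg ixB i (j+1)
    else (seg, ixB, false)

-- outer while of devolveUnicos; returns (primeiro, segundo, indicesB, i)
def duLoop : Nat → List Int → List Int → List Int → Nat → List Int × List Int × List Int × Nat
  | 0, p, seg, ixB, i => (p, seg, ixB, i)
  | fuel+1, p, seg, ixB, i =>
    if i < p.length then
      let r := duFind seg.length (p.getD i 0) seg ixB i i
      if r.2.2 then duLoop fuel p r.1 r.2.1 (i+1)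
      else duLoop fuel (p.eraseIdx i) seg ixB i      -- primeiro.pop(i); i -= 1; i += 1
    else (p, seg, ixB, i)

def devolveUnicos (primeiro : List Int) (segundo : List Int) : Option (List Int × List Int) :=
  let ra := removeDuplicadas primeiro
  let rb := removeDuplicadas segundo
  if 0 < ra.1.length ∧ 0 < rb.1.length then
    let r := duLoop (ra.1.length + 1) ra.1 rb.1 rb.2 0
    -- Python also truncates the (unused) value list segundo; only indicesB matters for the return
    let ixB := if (r.2.2.2 : Int) < (r.2.1.length : Int) - 1 then r.2.2.1.take r.2.2.2 else r.2.2.1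
    if 1 < r.1.length then some (ra.2, ixB) else none
  else none

-- ===== PORT B =====
def devolveUnicos_alt (primeiro : List Int) (segundo : List Int) : Option (List Int × List Int) :=
  let c1 := PySem.Dict.counter primeiro
  let c2 := PySem.Dict.counter segundo
  let ia := ((PySem.List.enumerate primeiro 0).filter (fun p => c1.getD p.2 0 == 1)).map (·.1)
  let pos2 := (PySem.List.enumerate segundo 0).foldl
      (fun d p => if c2.getD p.2 0 == 1 then d.insert p.2 p.1 else d) PySem.Dict.empty
  let ib := ia.filterMap (fun i =>
      let x := (PySem.List.pyGet? primeiro i).getD 0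
      if c2.getD x 0 == 1 then some (pos2.getD x 0) else none)
  if 1 < ib.length then some (ia, ib) else none

-- ===== PRECONDITION & SPEC =====
-- helper for D_: the unique (count = 1) elements of a list, and the number of common unique elements
def pvUniq (l : List Int) : List Int := l.filter (fun x => l.count x == 1)
def pvK (primeiro : List Int) (segundo : List Int) : Nat :=
  ((pvUniq primeiro).filter (fun x => (pvUniq segundo).contains x)).length

-- When k = pvK >= 2 common unique elements exist and k = (unique segundo count) - 1, A's off-by-one
-- guard 'if i < len(segundo)-1' skips the truncation and A returns indicesB with a dangling extra
-- index, while B returns exactly the k aligned indices, the intended value (A truncates to k otherwise).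
def D_devolveUnicos (primeiro : List Int) (segundo : List Int) : Prop :=
  2 ≤ pvK primeiro segundo ∧ pvK primeiro segundo + 1 = (pvUniq segundo).length
instance (primeiro : List Int) (segundo : List Int) : Decidable (D_devolveUnicos primeiro segundo) := by
  unfold D_devolveUnicos; infer_instance

def Spec_devolveUnicos (primeiro : List Int) (segundo : List Int) (out : Option (List Int × List Int)) : Prop :=
  ¬ D_devolveUnicos primeiro segundo → out = devolveUnicos_alt primeiro segundo
instance (primeiro : List Int) (segundo : List Int) (out : Option (List Int × List Int)) : Decidable (Spec_devolveUnicos primeiro segundo out) := by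
  unfold Spec_devolveUnicos; infer_instance

def pvDiffWitness_devolveUnicos : List Int × List Int := ([1, 2], [1, 2, 3])
def pvDiffWitnessOut_devolveUnicos : (Option (List Int × List Int)) × (Option (List Int × List Int)) :=
  (some ([0, 1], [0, 1, 2]), some ([0, 1], [0, 1]))

-- ===== CLAIM (what is proved, stated in full; the proofs are below) =====
def Claim_unchanged_devolveUnicos : Prop := ∀ (primeiro : List Int) (segundo : List Int), Dom_devolveUnicos primeiro segundo → Spec_devolveUnicos primeiro segundo (devolveUnicos primeiro segundo)
def Claim_changed_devolveUnicos : Prop := Dom_devolveUnicos (pvDiffWitness_devolveUnicos.1) (pvDiffWitness_devolveUnicos.2) ∧ D_devolveUnicos (pvDiffWitness_devolveUnicos.1) (pvDiffWitness_devolveUnicos.2) ∧ devolveUnicos (pvDiffWitness_devolveUnicos.1) (pvDiffWitness_devolveUnicos.2) = pvDiffWitnessOut_devolveUnicos.1 ∧ devolveUnicos_alt (pvDiffWitness_devolveUnicos.1) (pvDiffWitness_devolveUnicos.2) = pvDiffWitnessOut_devolveUnicos.2 ∧ pvDiffWitnessOut_devolveUnicos.1 ≠ pvDiffWitnessOut_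devolveUnicos.2
def Claim_exact_devolveUnicos : Prop := ∀ (primeiro : List Int) (segundo : List Int), Dom_devolveUnicos primeiro segundo → D_devolveUnicos primeiro segundo → devolveUnicos primeiro segundo ≠ devolveUnicos_alt primeiro segundo

-- ===== LEMMAS AND PROOFS =====

-- ---------- generic list helpers ----------

theorem pv_zip_set (l ix : List Int) (n : Nat) (a b : Int) :
    (l.set n a).zip (ix.set n b) = (l.zip ix).set n (a, b) := by
  induction l generalizing ix n with
  | nil => simp
  | cons x t ih =>
    cases ix with
    | nil => simp
    | cons y s =>
      cases n with
      | zero => simp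
      | succ m => simpa using ih s m

theorem pv_zip_eraseIdx (l ix : List Int) (n : Nat) (h : l.length = ix.length) :
    (l.eraseIdx n).zip (ix.eraseIdx n) = (l.zip ix).eraseIdx n := by
  induction l generalizing ix n with
  | nil => simp
  | cons x t ih =>
    cases ix with
    | nil => simp at h
    | cons y s =>
      cases n with
      | zero => simp
      | succ m =>
        simp only [List.eraseIdx_cons_succ, List.zip_cons_cons]
        rw [ih s m (by simpa using h)]

theorem pv_take_succ_getElem {α : Type} (l : List α) (n : Nat) (h : n < l.length) :
    l.take (n+1) = l.take n ++ [l[n]] := by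
  rw [List.take_add_one, List.getElem?_eq_getElem h]; rfl

theorem pv_nodup_length_le (m u2 : List Int) (h : m.Nodup) (hs : m ⊆ u2) :
    m.length ≤ u2.length := by
  classical
  calc m.length = m.toFinset.card := (List.toFinset_card_of_nodup h).symm
  _ ≤ u2.toFinset.card := Finset.card_le_card (by
      intro x hx; simp only [List.mem_toFinset] at *; exact hs hx)
  _ ≤ u2.length := u2.toFinset_card_le

-- ---------- Part 1: removeDuplicadas = filter (count = 1), with original indices ----------

-- reference recursion of the outer dedup loop on (value, index) pairs
def keepU : List (Int × Int) → List (Int × Int)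
  | [] => []
  | q :: t =>
    if t.any (fun r => r.1 == q.1) then keepU (t.filter (fun r => !(r.1 == q.1)))
    else q :: keepU t
termination_by l => l.length
decreasing_by
  · simp only [List.length_cons, List.length_unattach]
    exact Nat.lt_succ_of_le (le_trans (List.length_filter_le _ _) (by simp))
  · simp

theorem rdInner_spec (fuel : Nat) (v : Int) (l ix : List Int) (j : Nat)
    (h : l.length = ix.length) (hf : l.length - j ≤ fuel) :
    rdInner fuel v l ix j =
      (((l.zip ix).take j ++ ((l.zip ix).drop j).filter (fun q => !(q.1 == v))).map Prod.fst,
       ((l.zip ix).take j ++ ((l.zip ix).drop j).filter (fun q => !(q.1 == v))).map Prod.snd) := by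
  induction fuel generalizing l ix j with
  | zero =>
    have hj : l.length ≤ j := by omega
    have hz : (l.zip ix).length ≤ j := by simp [List.length_zip]; omega
    simp [rdInner, List.take_of_length_le hz, List.drop_eq_nil_of_le hz,
      List.map_fst_zip (le_of_eq h), List.map_snd_zip (ge_of_eq h)]
  | succ fuel ih =>
    by_cases hj : j < l.length
    · have hzj : j < (l.zip ix).length := by simp [List.length_zip]; omega
      have hgd : l.getD j 0 = l[j] := List.getD_eq_getElem l 0 hj
      have hcons : (l.zip ix).drop j = (l.zip ix)[j] :: (l.zip ix).drop (j+1) :=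
        List.drop_eq_getElem_cons hzj
      have hpair : (l.zip ix)[j] = (l[j], ix[j]) := List.getElem_zip ..
      by_cases hlv : l[j] = v
      · rw [show rdInner (fuel+1) v l ix j
              = rdInner fuel v (l.eraseIdx j) (ix.eraseIdx j) j by
            simp [rdInner, hj, hgd, hlv]]
        rw [ih (l.eraseIdx j) (ix.eraseIdx j) j
            (by simp [List.length_eraseIdx, h])
            (by simp [List.length_eraseIdx, hj]; omega)]
        rw [pv_zip_eraseIdx l ix j h]
        have hdec : (l.zip ix).eraseIdx j = (l.zip ix).take j ++ (l.zip ix).drop (j+1) :=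
          List.eraseIdx_eq_take_drop_succ ..
        have hlt : ((l.zip ix).take j).length = j := by simp [List.length_take]; omega
        have htk : ((l.zip ix).eraseIdx j).take j = (l.zip ix).take j := by
          rw [hdec, List.take_append_of_le_length (by omega), List.take_take]; simp
        have hdr : ((l.zip ix).eraseIdx j).drop j = (l.zip ix).drop (j+1) := by
          rw [hdec, List.drop_append_of_le_length (by omega)]
          simp [List.drop_take]
        rw [htk, hdr, hcons, hpair]
        simp [hlv]
      · rw [show rdInner (fuel+1) v l ix j = rdInner fuel v l ix (j+1) by
            simp [rdInner, hj, hgd, hlv]]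
        rw [ih l ix (j+1) h (by omega)]
        rw [pv_take_succ_getElem _ j hzj, hcons, hpair]
        simp [hlv]
    · have hz : (l.zip ix).length ≤ j := by simp [List.length_zip]; omega
      simp [rdInner, hj, List.take_of_length_le hz, List.drop_eq_nil_of_le hz,
        List.map_fst_zip (le_of_eq h), List.map_snd_zip (ge_of_eq h)]

theorem pv_count_split (l : List Int) (i : Nat) (h : i < l.length) (x : Int) :
    l.count x = (l.take i).count x + (if l[i] = x then 1 else 0) + (l.drop (i+1)).count x := by
  conv_lhs => rw [← List.take_append_drop i l]
  rw [List.count_append, List.drop_eq_getElem_cons h, List.count_cons]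
  by_cases he : l[i] = x <;> simp [he] <;> omega

theorem rdOuter_spec (fuel : Nat) (l ix : List Int) (i : Nat)
    (h : l.length = ix.length) (hf : 2 * l.length + 1 - i ≤ fuel)
    (hi : i ≤ l.length) (hclean : ∀ x ∈ l.take i, l.count x = 1) :
    rdOuter fuel l ix i =
      (((l.zip ix).take i ++ keepU ((l.zip ix).drop i)).map Prod.fst,
       ((l.zip ix).take i ++ keepU ((l.zip ix).drop i)).map Prod.snd) := by
  induction fuel generalizing l ix i with
  | zero => omega
  | succ fuel ih =>
    by_cases hj : i < l.length
    · have hzj : i < (l.zip ix).length := by simp [List.length_zip]; omega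
      have hgd : l.getD i 0 = l[i] := List.getD_eq_getElem l 0 hj
      have hcons : (l.zip ix).drop i = (l.zip ix)[i] :: (l.zip ix).drop (i+1) :=
        List.drop_eq_getElem_cons hzj
      have hpair : (l.zip ix)[i] = (l[i], ix[i]) := List.getElem_zip ..
      have hlcons : l.drop i = l[i] :: l.drop (i+1) := List.drop_eq_getElem_cons hj
      have hmfst : ((l.zip ix).drop (i+1)).map Prod.fst = l.drop (i+1) := by
        rw [List.map_drop, List.map_fst_zip (le_of_eq h)]
      by_cases hdup : l[i] ∈ l.drop (i+1)
      · -- duplicate branch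
        have hcond : ((l.drop (i+1)).contains (l.getD i 0)) = true := by
          simp only [hgd, List.contains_iff_mem]; exact hdup
        rw [show rdOuter (fuel+1) l ix i
              = rdOuter fuel
                  ((rdInner l.length (l.getD i 0) l ix (i+1)).1.eraseIdx i)
                  ((rdInner l.length (l.getD i 0) l ix (i+1)).2.eraseIdx i) i by
            simp only [rdOuter, if_pos hj, if_pos hcond]]
        rw [rdInner_spec l.length (l.getD i 0) l ix (i+1) h (by omega), hgd]
        set W1 : List (Int × Int) :=
          (l.zip ix).take (i+1) ++ ((l.zip ix).drop (i+1)).filter (fun q => !(q.1 == l[i])) with hW1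
        have hW1e : (W1.map Prod.fst).eraseIdx i = (W1.eraseIdx i).map Prod.fst :=
          List.eraseIdx_map ..
        have hW1e' : (W1.map Prod.snd).eraseIdx i = (W1.eraseIdx i).map Prod.snd :=
          List.eraseIdx_map ..
        have hlt1 : ((l.zip ix).take (i+1)).length = i+1 := by simp [List.length_take]; omega
        have hW1dec : W1.eraseIdx i = (l.zip ix).take i ++ ((l.zip ix).drop (i+1)).filter (fun q => !(q.1 == l[i])) := by
          rw [hW1, List.eraseIdx_append_of_lt_length (by omega)]
          congr 1
          rw [List.eraseIdx_eq_take_drop_succ, List.take_take]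
          simp [List.drop_take]
        rw [hW1e, hW1e', hW1dec]
        set L2 : List (Int × Int) :=
          (l.zip ix).take i ++ ((l.zip ix).drop (i+1)).filter (fun q => !(q.1 == l[i])) with hL2
        have hzipL2 : (L2.map Prod.fst).zip (L2.map Prod.snd) = L2 := by
          rw [List.zip_map']; simp
        have hlti : ((l.zip ix).take i).length = i := by simp [List.length_take]; omega
        have hfilt : (L2.map Prod.fst) = l.take i ++ (l.drop (i+1)).filter (fun x => !(x == l[i])) := by
          rw [hL2, List.map_append]
          congr 1
          · rw [List.map_take, List.map_fst_zip (le_of_eq h)]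
          · rw [show (fun (q : Int × Int) => !(q.1 == l[i])) = ((fun x => !(x == l[i])) ∘ Prod.fst) from rfl,
              ← List.filter_map, List.map_drop, List.map_fst_zip (le_of_eq h)]
        have hlen2 : (L2.map Prod.fst).length ≤ l.length - 1 := by
          rw [hfilt]
          have h1 : (l.take i).length = i := by simp; omega
          have h2 : ((l.drop (i+1)).filter (fun x => !(x == l[i]))).length ≤ (l.drop (i+1)).length :=
            List.length_filter_le _ _
          simp only [List.length_append, h1]
          simp at h2 ⊢
          omega
        have hlen2' : (L2.map Prod.fst).length = (L2.map Prod.snd).length := by simp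
        have htake2 : (L2.map Prod.fst).take i = l.take i := by
          rw [hfilt, List.take_append_of_le_length (by simp; omega), List.take_take]
          simp
        have hcnt : ∀ x, x ≠ l[i] → (L2.map Prod.fst).count x = l.count x := by
          intro x hx
          rw [hfilt, List.count_append,
            List.count_filter (by simp; exact hx),
            pv_count_split l i hj x, if_neg (fun he => hx he.symm)]
          omega
        have hv2 : 2 ≤ l.count l[i] := by
          have h1 : 1 ≤ (l.drop (i+1)).count l[i] := List.one_le_count_iff.mpr hdup
          rw [pv_count_split l i hj l[i], if_pos rfl]
          omega
        have hclean2 : ∀ x ∈ (L2.map Prod.fst).take i, (L2.map Prod.fst).count x = 1 := by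
          intro x hxm
          rw [htake2] at hxm
          have hx1 : l.count x = 1 := hclean x hxm
          have hxne : x ≠ l[i] := by intro he; rw [he] at hx1; omega
          rw [hcnt x hxne, hx1]
        have hil2 : i ≤ (L2.map Prod.fst).length := by
          rw [hfilt]; simp; omega
        rw [ih (L2.map Prod.fst) (L2.map Prod.snd) i hlen2' (by omega) hil2 hclean2, hzipL2]
        have htkL2 : L2.take i = (l.zip ix).take i := by
          rw [hL2, List.take_append_of_le_length (by omega), List.take_take]; simp
        have hdrL2 : L2.drop i = ((l.zip ix).drop (i+1)).filter (fun q => !(q.1 == l[i])) := by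
          rw [hL2, List.drop_append_of_le_length (by omega)]
          simp [List.drop_take]
        have hany : ((l.zip ix).drop (i+1)).any (fun r => r.1 == (l[i], ix[i]).1) = true := by
          simp only [List.any_eq_true]
          have : l[i] ∈ ((l.zip ix).drop (i+1)).map Prod.fst := by rw [hmfst]; exact hdup
          obtain ⟨r, hr, hre⟩ := List.mem_map.mp this
          exact ⟨r, hr, by simp [hre]⟩
        have hkeep : keepU ((l.zip ix).drop i)
            = keepU (((l.zip ix).drop (i+1)).filter (fun q => !(q.1 == l[i]))) := by
          rw [hcons, hpair, keepU, if_pos hany]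
        rw [htkL2, hdrL2, hkeep]
      · -- no-duplicate branch
        have hcond : ((l.drop (i+1)).contains (l.getD i 0)) = false := by
          simp only [hgd, List.contains_iff_mem]; simpa using hdup
        rw [show rdOuter (fuel+1) l ix i = rdOuter fuel l ix (i+1) by
            simp only [rdOuter, if_pos hj, hcond, Bool.false_eq_true, if_false]]
        have hcnt0 : (l.drop (i+1)).count l[i] = 0 := List.count_eq_zero.mpr hdup
        have hsplit : l.count l[i] = (l.take i).count l[i] + 1 + (l.drop (i+1)).count l[i] := by
          rw [pv_count_split l i hj l[i], if_pos rfl]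
        have hnotpre : (l.take i).count l[i] = 0 := by
          by_contra hne
          have hmem : l[i] ∈ l.take i := by
            have := Nat.pos_of_ne_zero hne
            exact List.one_le_count_iff.mp (by omega)
          have := hclean _ hmem
          omega
        have hclean1 : ∀ x ∈ l.take (i+1), l.count x = 1 := by
          intro x hxm
          rw [pv_take_succ_getElem l i hj] at hxm
          rcases List.mem_append.mp hxm with hx | hx
          · exact hclean x hx
          · have hxe : x = l[i] := by simpa using hx
            rw [hxe, hsplit, hnotpre, hcnt0]
        rw [ih l ix (i+1) h (by omega) (by omega) hclean1]
        have hany : ((l.zip ix).drop (i+1)).any (fun r => r.1 == (l[i], ix[i]).1) = false := by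
          simp only [List.any_eq_false]
          intro r hr
          have : r.1 ∈ ((l.zip ix).drop (i+1)).map Prod.fst := List.mem_map_of_mem hr
          rw [hmfst] at this
          simp
          intro he; rw [he] at this; exact hdup this
        have hkeep : keepU ((l.zip ix).drop i) = (l[i], ix[i]) :: keepU ((l.zip ix).drop (i+1)) := by
          rw [hcons, hpair, keepU, if_neg (by simp [hany])]
        rw [pv_take_succ_getElem _ i hzj, hpair, hkeep]
        simp
    · -- loop exit
      have hieq : i = l.length := by omega
      have hz : (l.zip ix).length ≤ i := by simp [List.length_zip]; omega
      simp [rdOuter, hj, List.take_of_length_le hz, List.drop_eq_nil_of_le hz, keepU,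
        List.map_fst_zip (le_of_eq h), List.map_snd_zip (ge_of_eq h)]

theorem keepU_eq_aux : ∀ (n : Nat) (w : List (Int × Int)), w.length ≤ n →
    keepU w = w.filter (fun q => w.countP (fun r => r.1 == q.1) == 1) := by
  intro n
  induction n with
  | zero =>
    intro w hw
    have : w = [] := List.eq_nil_of_length_eq_zero (by omega)
    subst this; simp [keepU]
  | succ n ih =>
    intro w hw
    match w with
    | [] => simp [keepU]
    | q :: t =>
      rw [keepU]
      by_cases hany : (t.any fun r => r.1 == q.1) = true
      · rw [if_pos hany]
        obtain ⟨r0, hr0, hre0⟩ := List.any_eq_true.mp hany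
        have hge : 1 ≤ t.countP (fun r => r.1 == q.1) := by
          calc 1 = [r0].countP (fun r' => r'.1 == q.1) := by simp [hre0]
          _ ≤ _ := List.Sublist.countP_le (List.singleton_sublist.mpr hr0)
        rw [ih _ (le_trans (List.length_filter_le _ _) (by simpa using Nat.le_of_succ_le_succ hw))]
        rw [List.filter_cons_of_neg (by
          rw [List.countP_cons]
          simp only [beq_self_eq_true, if_true, beq_iff_eq]
          omega)]
        rw [List.filter_filter]
        apply List.filter_congr
        intro r hr
        by_cases hrq : r.1 = q.1
        · have h2 : 1 ≤ t.countP (fun r' => r'.1 == r.1) := by rw [hrq]; exact hge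
          have h3 : ((q :: t).countP (fun r' => r'.1 == r.1) == 1) = false := by
            rw [List.countP_cons]
            simp only [hrq, beq_self_eq_true, if_true, beq_eq_false_iff_ne, ne_eq]
            omega
          have h4 : ((r.1 == q.1) : Bool) = true := by simp [hrq]
          rw [h3, h4]
          simp
        · have h1 : (q :: t).countP (fun r' => r'.1 == r.1) = t.countP (fun r' => r'.1 == r.1) := by
            rw [List.countP_cons]
            simp only [beq_iff_eq, if_neg (show ¬ q.1 = r.1 from fun he => hrq he.symm)]
            omega
          have h2 : (t.filter (fun r' => !(r'.1 == q.1))).countP (fun r' => r'.1 == r.1)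
              = t.countP (fun r' => r'.1 == r.1) := by
            rw [List.countP_filter]
            apply List.countP_congr
            intro a _
            by_cases ha : a.1 = r.1 <;> simp [ha, hrq]
          rw [h1, h2]
          have h4 : ((r.1 == q.1) : Bool) = false := by simp [hrq]
          rw [h4]
          simp
      · rw [if_neg hany]
        rw [List.any_eq_true] at hany
        have hnone : ∀ r ∈ t, ¬ r.1 = q.1 := by
          intro r hr he
          exact hany ⟨r, hr, by simp [he]⟩
        have hz : t.countP (fun r => r.1 == q.1) = 0 := by
          rw [List.countP_eq_zero]
          intro r hr; simpa using hnone r hr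
        rw [ih _ (by simpa using Nat.le_of_succ_le_succ hw)]
        rw [List.filter_cons_of_pos (by rw [List.countP_cons, hz]; simp)]
        congr 1
        apply List.filter_congr
        intro r hr
        rw [List.countP_cons]
        simp only [beq_iff_eq, if_neg (show ¬ q.1 = r.1 from fun he => hnone r hr he.symm)]
        rw [Nat.add_zero]

theorem keepU_eq (w : List (Int × Int)) :
    keepU w = w.filter (fun q => w.countP (fun r => r.1 == q.1) == 1) :=
  keepU_eq_aux w.length w le_rfl

-- (index, value) pairs of the unique elements, in order: the common spec of both programs
def uE (l : List Int) : List (Int × Int) :=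
  (PySem.List.enumerate l 0).filter (fun p => l.count p.2 == 1)

theorem pv_zip_range (l : List Int) (s : Int) :
    l.zip (PySem.List.pyRange s (s + l.length) 1) =
      (PySem.List.enumerate l s).map (fun p => (p.2, p.1)) := by
  induction l generalizing s with
  | nil => simp
  | cons x t ih =>
    rw [PySem.List.enumerate_cons, PySem.List.pyRange_one_cons ?h]
    case h => simp only [List.length_cons]; push_cast; omega
    simp only [List.map_cons, List.zip_cons_cons]
    rw [show s + ((x :: t).length : Int) = (s + 1) + (t.length : Int) by
      simp only [List.length_cons]; push_cast; omega]
    rw [ih (s+1)]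

theorem enum_countP (l : List Int) (x : Int) :
    ((PySem.List.enumerate l 0).map (fun p : Int × Int => (p.2, p.1))).countP
      (fun r => r.1 == x) = l.count x := by
  rw [List.countP_map]
  have h1 : ((fun (r : Int × Int) => r.1 == x) ∘ (fun p : Int × Int => (p.2, p.1)))
      = (fun p : Int × Int => p.2 == x) := rfl
  rw [h1]
  have h2 : (PySem.List.enumerate l 0).map Prod.snd = l := PySem.List.map_snd_enumerate ..
  calc (PySem.List.enumerate l 0).countP (fun p => p.2 == x)
      = ((PySem.List.enumerate l 0).map Prod.snd).countP (fun y => y == x) := by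
        rw [List.countP_map]; rfl
  _ = l.count x := by rw [h2]; rfl

theorem removeDuplicadas_eq (l : List Int) :
    removeDuplicadas l = ((uE l).map Prod.snd, (uE l).map Prod.fst) := by
  have hlen : l.length = (PySem.List.pyRange 0 l.length 1).length := by
    rw [show ((l.length : Int)) = 0 + (l.length : Int) by omega, ← PySem.List.map_fst_enumerate l 0]
    simp
  rw [removeDuplicadas, rdOuter_spec _ _ _ 0 hlen (by omega) (by omega) (by simp)]
  have hz : l.zip (PySem.List.pyRange 0 (l.length : Int) 1)
      = (PySem.List.enumerate l 0).map (fun p => (p.2, p.1)) := by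
    have := pv_zip_range l 0
    rw [show (0 : Int) + (l.length : Int) = (l.length : Int) by omega] at this
    exact this
  rw [hz]
  simp only [List.take_zero, List.drop_zero, List.nil_append, keepU_eq]
  have hfil : ((PySem.List.enumerate l 0).map (fun p : Int × Int => (p.2, p.1))).filter
        (fun q => ((PySem.List.enumerate l 0).map (fun p : Int × Int => (p.2, p.1))).countP
            (fun r => r.1 == q.1) == 1)
      = (uE l).map (fun p : Int × Int => (p.2, p.1)) := by
    rw [List.filter_map, uE]
    congr 1
    apply List.filter_congr
    intro p _
    simp only [Function.comp]
    rw [enum_countP l p.2]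
  rw [hfil]
  rw [List.map_map, List.map_map]; rfl

-- ---------- Part 2: the swap-based matching loop ----------

-- generic form of the Python tuple swap (both value and index lists, and their zip)
def gswap {α : Type} (z : List α) (d : α) (i j : Nat) : List α :=
  (z.set i (z.getD j d)).set j (z.getD i d)

theorem pySwap_eq_gswap (l : List Int) (i j : Nat) : pySwap l i j = gswap l 0 i j := rfl

theorem gswap_self {α : Type} (z : List α) (d : α) (i : Nat) (h : i < z.length) :
    gswap z d i i = z := by
  rw [gswap, List.getD_eq_getElem z d h, List.set_set, List.set_getElem_self]

theorem gswap_decomp {α : Type} (z : List α) (d : α) (i j : Nat) (hij : i < j) (hj : j < z.length) :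
    gswap z d i j
      = z.take i ++ z[j] :: (((z.drop (i+1)).take (j-i-1)) ++ z[i] :: z.drop (j+1)) := by
  have hi : i < z.length := by omega
  rw [gswap, List.getD_eq_getElem z d hj, List.getD_eq_getElem z d hi]
  have hlt : (z.take i ++ [z[j]]).length = i + 1 := by simp [List.length_take]; omega
  rw [show z.set i z[j] = (z.take i ++ [z[j]]) ++ z.drop (i+1) by
    rw [List.set_eq_take_append_cons_drop, if_pos hi]; simp]
  rw [List.set_append_right _ _ (by omega), hlt]
  rw [show (z.drop (i+1)).set (j - (i+1)) z[i]
        = (z.drop (i+1)).take (j-i-1) ++ z[i] :: z.drop (j+1) by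
    rw [List.set_eq_take_append_cons_drop, if_pos (by simp [List.length_drop]; omega)]
    rw [List.drop_drop]
    rw [show i + 1 + (j - (i+1) + 1) = j + 1 by omega, show j - (i+1) = j - i - 1 by omega]]
  simp

theorem pv_decomp {α : Type} (z : List α) (i j : Nat) (hij : i < j) (hj : j < z.length) :
    z = z.take i ++ z[i] :: (((z.drop (i+1)).take (j-i-1)) ++ z[j] :: z.drop (j+1)) := by
  have hi : i < z.length := by omega
  conv_lhs => rw [← List.take_append_drop i z, List.drop_eq_getElem_cons hi]
  congr 2
  conv_lhs => rw [← List.take_append_drop (j-i-1) (z.drop (i+1))]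
  congr 1
  rw [List.drop_drop, show i + 1 + (j - i - 1) = j by omega]
  exact List.drop_eq_getElem_cons hj

theorem pv_perm_swap_mid {α : Type} (a b : α) (m r : List α) :
    List.Perm (a :: (m ++ b :: r)) (b :: (m ++ a :: r)) :=
  (List.Perm.cons a List.perm_middle).trans
    ((List.Perm.swap b a (m ++ r)).trans (List.Perm.cons b List.perm_middle.symm))

theorem gswap_perm {α : Type} (z : List α) (d : α) (i j : Nat) (hij : i ≤ j) (hj : j < z.length) :
    List.Perm (gswap z d i j) z := by
  rcases Nat.lt_or_ge i j with hlt | hge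
  · rw [gswap_decomp z d i j hlt hj]
    conv_rhs => rw [pv_decomp z i j hlt hj]
    exact List.Perm.append_left _ (pv_perm_swap_mid ..)
  · have : i = j := by omega
    subst this
    rw [gswap_self z d i hj]

theorem gswap_take_succ {α : Type} (z : List α) (d : α) (i j : Nat) (hij : i ≤ j) (hj : j < z.length) :
    (gswap z d i j).take (i+1) = z.take i ++ [z[j]] := by
  rcases Nat.lt_or_ge i j with hlt | hge
  · rw [gswap_decomp z d i j hlt hj]
    rw [List.take_append]
    have h1 : (z.take i).length = i := by simp [List.length_take]; omega
    rw [List.take_of_length_le (by omega), h1]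
    simp
  · have : i = j := by omega
    subst this
    rw [gswap_self z d i hj, pv_take_succ_getElem z i hj]

theorem gswap_mem_drop {α : Type} (z : List α) (d : α) (i j : Nat) (hij : i ≤ j) (hj : j < z.length)
    (x : α) (hx : ¬ x = z[j]) :
    (x ∈ (gswap z d i j).drop (i+1)) ↔ x ∈ z.drop i := by
  have hi : i < z.length := by omega
  rcases Nat.lt_or_ge i j with hlt | hge
  · rw [gswap_decomp z d i j hlt hj]
    rw [List.drop_append]
    have h1 : (z.take i).length = i := by simp [List.length_take]; omega
    rw [List.drop_of_length_le (by omega), h1]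
    rw [show z.drop i = z[i] :: ((z.drop (i+1)).take (j-i-1) ++ z[j] :: z.drop (j+1)) by
      conv_lhs => rw [pv_decomp z i j hlt hj]
      rw [List.drop_append_of_le_length (by omega)]
      simp [List.drop_take, h1]]
    simp only [List.nil_append, show i + 1 - i = 1 by omega, List.drop_one, List.tail_cons,
      List.mem_append, List.mem_cons, hx]
    tauto
  · have : i = j := by omega
    subst this
    rw [gswap_self z d i hj]
    conv_rhs => rw [List.drop_eq_getElem_cons hi]
    rw [List.mem_cons]
    constructor
    · exact fun h => Or.inr h
    · rintro (h | h)
      · exact absurd h hx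
      · exact h

theorem pv_zip_getD (a b : List Int) (n : Nat) (h : a.length = b.length) (hn : n < a.length) :
    (a.zip b).getD n (0, 0) = (a.getD n 0, b.getD n 0) := by
  have hz : n < (a.zip b).length := by simp [List.length_zip]; omega
  rw [List.getD_eq_getElem _ _ hz, List.getD_eq_getElem a 0 hn,
    List.getD_eq_getElem b 0 (by omega), List.getElem_zip]

theorem pv_zip_pySwap (a b : List Int) (i j : Nat) (h : a.length = b.length)
    (hi : i < a.length) (hj : j < a.length) :
    (pySwap a i j).zip (pySwap b i j) = gswap (a.zip b) (0, 0) i j := by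
  rw [pySwap, pySwap, gswap, pv_zip_set, pv_zip_set, pv_zip_getD a b j h hj, pv_zip_getD a b i h hi]

theorem pySwap_length (l : List Int) (i j : Nat) : (pySwap l i j).length = l.length := by
  simp [pySwap]

theorem duFind_none (fuel : Nat) (v : Int) (seg ixB : List Int) (i j : Nat)
    (h : ¬ v ∈ seg.drop j) : duFind fuel v seg ixB i j = (seg, ixB, false) := by
  induction fuel generalizing j with
  | zero => rfl
  | succ fuel ih =>
    by_cases hj : j < seg.length
    · have hgd : seg.getD j 0 = seg[j] := List.getD_eq_getElem seg 0 hj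
      have hcons : seg.drop j = seg[j] :: seg.drop (j+1) := List.drop_eq_getElem_cons hj
      have hne : ¬ seg[j] = v := by
        intro he; exact h (by rw [hcons, he]; exact List.mem_cons_self ..)
      have h2 : ¬ v ∈ seg.drop (j+1) := by
        intro hm; exact h (by rw [hcons]; exact List.mem_cons_of_mem _ hm)
      rw [show duFind (fuel+1) v seg ixB i j = duFind fuel v seg ixB i (j+1) by
        simp [duFind, hj, hgd, hne]]
      exact ih (j+1) h2
    · simp [duFind, hj]

theorem duFind_found (fuel : Nat) (v : Int) (seg ixB : List Int) (i j : Nat)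
    (hf : seg.length - j ≤ fuel) (h : v ∈ seg.drop j) :
    ∃ j0, j ≤ j0 ∧ ∃ (hj0 : j0 < seg.length), seg[j0] = v ∧
      duFind fuel v seg ixB i j = (pySwap seg i j0, pySwap ixB i j0, true) := by
  induction fuel generalizing j with
  | zero =>
    exfalso
    rw [List.drop_eq_nil_of_le (by omega)] at h
    exact List.not_mem_nil h
  | succ fuel ih =>
    by_cases hj : j < seg.length
    · have hgd : seg.getD j 0 = seg[j] := List.getD_eq_getElem seg 0 hj
      have hcons : seg.drop j = seg[j] :: seg.drop (j+1) := List.drop_eq_getElem_cons hj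
      by_cases hv : seg[j] = v
      · exact ⟨j, le_rfl, hj, hv, by simp [duFind, hj, hgd, hv]⟩
      · have h2 : v ∈ seg.drop (j+1) := by
          rw [hcons] at h
          rcases List.mem_cons.mp h with he | hm
          · exact absurd he.symm hv
          · exact hm
        obtain ⟨j0, hj0j, hj0, hj0v, hfind⟩ := ih (j+1) (by omega) h2
        refine ⟨j0, by omega, hj0, hj0v, ?_⟩
        rw [show duFind (fuel+1) v seg ixB i j = duFind fuel v seg ixB i (j+1) by
          simp [duFind, hj, hgd, hv]]
        exact hfind
    · exfalso
      rw [List.drop_eq_nil_of_le (by omega)] at h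
      exact List.not_mem_nil h

theorem duLoop_spec (fuel : Nat) (p seg ixB : List Int) (i : Nat)
    (hf : p.length - i < fuel) (hp : p.Nodup) (hs : seg.Nodup) (hlen : seg.length = ixB.length)
    (hip : i ≤ p.length) (his : i ≤ seg.length) (hpre : p.take i = seg.take i) :
    ∃ seg' ixB', duLoop fuel p seg ixB i =
      (p.take i ++ (p.drop i).filter (fun x => (seg.drop i).contains x), seg', ixB',
       i + ((p.drop i).filter (fun x => (seg.drop i).contains x)).length)
    ∧ seg'.length = seg.length ∧ ixB'.length = ixB.length
    ∧ List.Perm (seg'.zip ixB') (seg.zip ixB)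
    ∧ seg'.take (i + ((p.drop i).filter (fun x => (seg.drop i).contains x)).length)
        = p.take i ++ (p.drop i).filter (fun x => (seg.drop i).contains x) := by
  induction fuel generalizing p seg ixB i with
  | zero => exact absurd hf (by omega)
  | succ fuel ih =>
    by_cases hil : i < p.length
    · have hgd : p.getD i 0 = p[i] := List.getD_eq_getElem p 0 hil
      have hpcons : p.drop i = p[i] :: p.drop (i+1) := List.drop_eq_getElem_cons hil
      have hpd : (p.drop i).Nodup := List.Nodup.sublist (List.drop_sublist ..) hp
      have hhead : ¬ p[i] ∈ p.drop (i+1) := by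
        rw [hpcons] at hpd
        exact (List.nodup_cons.mp hpd).1
      by_cases hmem : p[i] ∈ seg.drop i
      · -- match found: swap and advance
        obtain ⟨j0, hj0i, hj0, hj0v, hfind⟩ :=
          duFind_found seg.length (p.getD i 0) seg ixB i i (by omega) (by rwa [hgd])
        rw [hgd] at hfind hj0v
        have hswlen : (pySwap seg i j0).length = seg.length := pySwap_length ..
        have hswlen2 : (pySwap ixB i j0).length = ixB.length := pySwap_length ..
        have hstep : duLoop (fuel+1) p seg ixB i
            = duLoop fuel p (pySwap seg i j0) (pySwap ixB i j0) (i+1) := by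
          rw [duLoop]
          rw [if_pos hil, hgd, hfind]
          simp
        have hzlen : j0 < (seg.zip ixB).length := by simp [List.length_zip]; omega
        have hgperm : List.Perm ((pySwap seg i j0).zip (pySwap ixB i j0)) (seg.zip ixB) := by
          rw [pv_zip_pySwap seg ixB i j0 hlen (by omega) hj0]
          exact gswap_perm _ _ _ _ hj0i hzlen
        have hnodup1 : (pySwap seg i j0).Nodup := by
          rw [pySwap_eq_gswap]
          exact ((gswap_perm seg 0 i j0 hj0i hj0).nodup_iff).mpr hs
        have hpre1 : p.take (i+1) = (pySwap seg i j0).take (i+1) := by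
          rw [pv_take_succ_getElem p i hil, pySwap_eq_gswap,
            gswap_take_succ seg 0 i j0 hj0i hj0, hj0v, hpre]
        obtain ⟨seg'', ixB'', heq, hl1, hl2, hperm, htk⟩ :=
          ih p (pySwap seg i j0) (pySwap ixB i j0) (i+1) (by omega) hp hnodup1
            (by rw [hswlen, hswlen2]; exact hlen) (by omega) (by omega) hpre1
        have hfilt_eq : (p.drop (i+1)).filter (fun x => ((pySwap seg i j0).drop (i+1)).contains x)
            = (p.drop (i+1)).filter (fun x => (seg.drop i).contains x) := by
          apply List.filter_congr
          intro x hx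
          have hxne : ¬ x = seg[j0] := by rw [hj0v]; intro he; rw [he] at hx; exact hhead hx
          have := gswap_mem_drop seg 0 i j0 hj0i hj0 x hxne
          rw [pySwap_eq_gswap, Bool.eq_iff_iff]
          simp only [List.contains_iff_mem]
          exact this
        have hF : (p.drop i).filter (fun x => (seg.drop i).contains x)
            = p[i] :: (p.drop (i+1)).filter (fun x => ((pySwap seg i j0).drop (i+1)).contains x) := by
          rw [hpcons, List.filter_cons_of_pos (by simpa [List.contains_iff_mem] using hmem), hfilt_eq]
        refine ⟨seg'', ixB'', ?_, by rw [hl1, hswlen], by rw [hl2, hswlen2],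
          hperm.trans hgperm, ?_⟩
        · rw [hstep, heq, hF, pv_take_succ_getElem p i hil]
          simp only [Prod.mk.injEq, List.append_assoc, List.singleton_append, List.length_cons]
          refine ⟨by simp, by simp, by simp, by omega⟩
        · rw [hF]
          rw [show i + (p[i] :: (p.drop (i+1)).filter
                (fun x => ((pySwap seg i j0).drop (i+1)).contains x)).length
              = (i+1) + ((p.drop (i+1)).filter
                (fun x => ((pySwap seg i j0).drop (i+1)).contains x)).length by
            simp only [List.length_cons]; omega]
          rw [htk, pv_take_succ_getElem p i hil, List.append_assoc, List.singleton_append]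
      · -- no match: pop primeiro[i]
        have hfind : duFind seg.length (p.getD i 0) seg ixB i i = (seg, ixB, false) :=
          duFind_none _ _ _ _ _ _ (by rwa [hgd])
        have hstep : duLoop (fuel+1) p seg ixB i = duLoop fuel (p.eraseIdx i) seg ixB i := by
          rw [duLoop]
          rw [if_pos hil, hfind]
          simp
        have hpdec : p.eraseIdx i = p.take i ++ p.drop (i+1) := List.eraseIdx_eq_take_drop_succ ..
        have hplen : (p.eraseIdx i).length = p.length - 1 := by
          simp [List.length_eraseIdx, hil]
        have htklen : (p.take i).length = i := by simp [List.length_take]; omega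
        have hp2 : (p.eraseIdx i).Nodup := List.Nodup.sublist (List.eraseIdx_sublist ..) hp
        have hpre2 : (p.eraseIdx i).take i = seg.take i := by
          rw [hpdec, List.take_append_of_le_length (by omega), List.take_take]
          simpa using hpre
        obtain ⟨seg'', ixB'', heq, hl1, hl2, hperm, htk⟩ :=
          ih (p.eraseIdx i) seg ixB i (by omega) hp2 hs hlen (by omega) his hpre2
        have hdrop2 : (p.eraseIdx i).drop i = p.drop (i+1) := by
          rw [hpdec, List.drop_append_of_le_length (by omega)]
          rw [List.drop_eq_nil_of_le (by simp [List.length_take]), List.nil_append]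
        have htake2 : (p.eraseIdx i).take i = p.take i := by
          rw [hpre2, hpre]
        have hF : (p.drop i).filter (fun x => (seg.drop i).contains x)
            = (p.drop (i+1)).filter (fun x => (seg.drop i).contains x) := by
          rw [hpcons, List.filter_cons_of_neg (by simpa [List.contains_iff_mem] using hmem)]
        rw [hdrop2, htake2] at heq htk
        refine ⟨seg'', ixB'', ?_, hl1, hl2, hperm, ?_⟩
        · rw [hstep, heq, hF]
        · rw [hF]
          exact htk
    · have hieq : i = p.length := by omega
      have hstep : duLoop (fuel+1) p seg ixB i = (p, seg, ixB, i) := by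
        rw [duLoop, if_neg hil]
      have hdrop : p.drop i = [] := List.drop_eq_nil_of_le (by omega)
      have htake : p.take i = p := List.take_of_length_le (by omega)
      refine ⟨seg, ixB, ?_, rfl, rfl, List.Perm.refl _, ?_⟩
      · rw [hstep, hdrop, htake]
        simp
      · rw [hdrop]
        simp only [List.filter_nil, List.length_nil, Nat.add_zero, List.append_nil]
        rw [htake] at hpre ⊢
        exact hpre.symm

-- ---------- Part 3: the hash-based B and the final assembly ----------

theorem pvUniq_eq (l : List Int) : (uE l).map Prod.snd = pvUniq l := by
  rw [uE, pvUniq, show (fun (p : Int × Int) => l.count p.2 == 1)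
      = ((fun x => l.count x == 1) ∘ Prod.snd) from rfl, ← List.filter_map,
    PySem.List.map_snd_enumerate]

theorem pvUniq_nodup (l : List Int) : (pvUniq l).Nodup := by
  rw [List.nodup_iff_count_le_one]
  intro a
  by_cases ha : (l.count a == 1) = true
  · have h1 : (pvUniq l).count a ≤ l.count a :=
      (List.filter_sublist (l := l)).count_le a
    have h2 : l.count a = 1 := by simpa using ha
    omega
  · have hm : ¬ a ∈ pvUniq l := by
      intro hm
      rw [pvUniq, List.mem_filter] at hm
      exact ha hm.2
    rw [List.count_eq_zero.mpr hm]
    omega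

theorem pvUniq_mem (l : List Int) (x : Int) : x ∈ pvUniq l ↔ l.count x = 1 := by
  rw [pvUniq, List.mem_filter]
  constructor
  · intro h
    simpa using h.2
  · intro h
    exact ⟨List.one_le_count_iff.mp (by omega), by simpa using h⟩

theorem uE_get (l : List Int) (q : Int × Int) (hq : q ∈ uE l) :
    (PySem.List.pyGet? l q.1).getD 0 = q.2 := by
  rw [uE, List.mem_filter] at hq
  obtain ⟨k, hk, hqe⟩ := (PySem.List.mem_enumerate_iff ..).mp hq.1
  rw [hqe]
  simp [PySem.List.pyGet?_natCast, hk]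

theorem counter_pred (l : List Int) (x : Int) :
    ((PySem.Dict.counter l).getD x 0 == 1) = (l.count x == 1) := by
  rw [PySem.Dict.getD_counter, Bool.eq_iff_iff]
  simp only [beq_iff_eq]
  omega

-- first pair with the given value; pvIdx s x = original index of x among the uniques of s
def pvFindKey (l : List (Int × Int)) (x : Int) : Int :=
  ((l.find? (fun r => r.2 == x)).getD (0, 0)).1

theorem pvFindKey_spec (l : List (Int × Int)) (hnd : (l.map Prod.snd).Nodup)
    (q : Int × Int) (hq : q ∈ l) : pvFindKey l q.2 = q.1 := by
  induction l with
  | nil => simp at hq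
  | cons r0 t ih =>
    simp only [List.map_cons, List.nodup_cons] at hnd
    by_cases h0 : (r0.2 == q.2) = true
    · have : r0 = q := by
        rcases List.mem_cons.mp hq with he | hm
        · exact he.symm
        · exfalso
          exact hnd.1 (by rw [show r0.2 = q.2 by simpa using h0]; exact List.mem_map_of_mem hm)
      rw [pvFindKey, List.find?_cons_of_pos (p := fun (r : Int × Int) => r.2 == q.2) h0]
      simp [this]
    · have hq' : q ∈ t := by
        rcases List.mem_cons.mp hq with he | hm
        · exfalso; rw [he] at h0; simp at h0
        · exact hm
      rw [pvFindKey, List.find?_cons_of_neg (p := fun (r : Int × Int) => r.2 == q.2) h0]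
      exact ih hnd.2 hq'

theorem foldl_if_insert (c : Int × Int → Bool) :
    ∀ (l : List (Int × Int)) (d : PySem.Dict Int Int),
    l.foldl (fun d p => if c p then d.insert p.2 p.1 else d) d
      = (l.filter c).foldl (fun d p => d.insert p.2 p.1) d := by
  intro l
  induction l with
  | nil => intro d; rfl
  | cons q t ih =>
    intro d
    by_cases hc : c q = true
    · rw [List.filter_cons_of_pos hc]
      simp only [List.foldl_cons, hc, if_true]
      exact ih _
    · rw [List.filter_cons_of_neg hc]
      simp only [List.foldl_cons, hc, Bool.false_eq_true, if_false]
      exact ih _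

theorem getD_fold_insert_not_mem :
    ∀ (l : List (Int × Int)) (d : PySem.Dict Int Int) (x : Int),
    ¬ x ∈ l.map Prod.snd →
    (l.foldl (fun d p => d.insert p.2 p.1) d).getD x 0 = d.getD x 0 := by
  intro l
  induction l with
  | nil => intro d x _; rfl
  | cons q t ih =>
    intro d x hx
    simp only [List.map_cons, List.mem_cons] at hx
    push_neg at hx
    simp only [List.foldl_cons]
    rw [ih _ x (by simpa using hx.2)]
    rw [PySem.Dict.getD_insert]
    rw [if_neg hx.1]

theorem getD_fold_insert_mem :
    ∀ (l : List (Int × Int)) (d : PySem.Dict Int Int) (q : Int × Int),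
    q ∈ l → (l.map Prod.snd).Nodup →
    (l.foldl (fun d p => d.insert p.2 p.1) d).getD q.2 0 = q.1 := by
  intro l
  induction l with
  | nil => intro d q hq _; simp at hq
  | cons q0 t ih =>
    intro d q hq hnd
    simp only [List.map_cons, List.nodup_cons] at hnd
    simp only [List.foldl_cons]
    rcases List.mem_cons.mp hq with he | hm
    · subst he
      rw [getD_fold_insert_not_mem t _ q.2 hnd.1]
      rw [PySem.Dict.getD_insert, if_pos rfl]
    · exact ih _ q hm hnd.2

theorem filterMap_pair_if {α : Type} (c : α → Bool) (g : α → Int) :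
    ∀ (l : List α),
    l.filterMap (fun x => if c x then some (g x) else none) = (l.filter c).map g := by
  intro l
  induction l with
  | nil => rfl
  | cons x t ih =>
    by_cases hc : c x = true
    · rw [List.filterMap_cons, List.filter_cons_of_pos hc]
      simp only [hc, if_true, List.map_cons]
      rw [ih]
    · rw [List.filterMap_cons, List.filter_cons_of_neg hc]
      simp only [hc, Bool.false_eq_true, if_false]
      rw [ih]

theorem devolveUnicos_main : ∀ (primeiro : List Int) (segundo : List Int),
    (¬ D_devolveUnicos primeiro segundo → devolveUnicos primeiro segundo = devolveUnicos_alt primeiro segundo)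
    ∧ (D_devolveUnicos primeiro segundo → devolveUnicos primeiro segundo ≠ devolveUnicos_alt primeiro segundo) := by
  intro p s
  have hrd1 : removeDuplicadas p = (pvUniq p, (uE p).map Prod.fst) := by
    rw [removeDuplicadas_eq, pvUniq_eq]
  have hrd2 : removeDuplicadas s = (pvUniq s, (uE s).map Prod.fst) := by
    rw [removeDuplicadas_eq, pvUniq_eq]
  have hlen2 : (pvUniq s).length = ((uE s).map Prod.fst).length := by
    rw [← pvUniq_eq]; simp
  obtain ⟨seg', ixB', heq, hl1, hl2, hperm, htk⟩ :=
    duLoop_spec ((pvUniq p).length + 1) (pvUniq p) (pvUniq s) ((uE s).map Prod.fst) 0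
      (by omega) (pvUniq_nodup p) (pvUniq_nodup s) hlen2 (by omega) (by omega) rfl
  simp only [List.drop_zero, List.take_zero, List.nil_append, Nat.zero_add] at heq htk
  have hFnodup : ((pvUniq p).filter (fun x => (pvUniq s).contains x)).Nodup :=
    List.Nodup.sublist List.filter_sublist (pvUniq_nodup p)
  have hFsub : ((pvUniq p).filter (fun x => (pvUniq s).contains x)) ⊆ pvUniq s := by
    intro x hx
    rw [List.mem_filter] at hx
    exact (List.contains_iff_mem).mp hx.2
  have hkle : ((pvUniq p).filter (fun x => (pvUniq s).contains x)).length ≤ (pvUniq s).length :=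
    pv_nodup_length_le _ _ hFnodup hFsub
  have hkle1 : ((pvUniq p).filter (fun x => (pvUniq s).contains x)).length ≤ (pvUniq p).length :=
    List.length_filter_le _ _
  have hzip2 : (pvUniq s).zip ((uE s).map Prod.fst)
      = (uE s).map (fun q => (q.2, q.1)) := by
    rw [← pvUniq_eq]
    exact List.zip_map' ..
  have hsndnodup : ((uE s).map Prod.snd).Nodup := by rw [pvUniq_eq]; exact pvUniq_nodup s
  have hlenB : ixB'.length = (pvUniq s).length := by rw [hl2, ← hlen2]
  have hlenS : seg'.length = (pvUniq s).length := hl1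
  -- A's aligned prefix of indicesB equals the looked-up indices
  have hC1 : ixB'.take ((pvUniq p).filter (fun x => (pvUniq s).contains x)).length
      = ((pvUniq p).filter (fun x => (pvUniq s).contains x)).map (pvFindKey (uE s)) := by
    apply List.ext_getElem
    · simp only [List.length_take, List.length_map]
      omega
    · intro n h1 h2
      simp only [List.length_take] at h1
      have hn : n < ((pvUniq p).filter (fun x => (pvUniq s).contains x)).length := by omega
      have hnB : n < ixB'.length := by omega
      have hnS : n < seg'.length := by omega
      have hnz : n < (seg'.zip ixB').length := by simp [List.length_zip]; omega
      have hmem : (seg'[n], ixB'[n]) ∈ seg'.zip ixB' := by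
        have := List.getElem_mem hnz
        rwa [List.getElem_zip] at this
      have hmem2 : (seg'[n], ixB'[n]) ∈ (uE s).map (fun q => (q.2, q.1)) := by
        rw [← hzip2]
        exact hperm.subset hmem
      obtain ⟨q, hq, hqe⟩ := List.mem_map.mp hmem2
      have hseg : seg'[n] = q.2 := by
        have := congrArg Prod.fst hqe; simpa using this.symm
      have hixB : ixB'[n] = q.1 := by
        have := congrArg Prod.snd hqe; simpa using this.symm
      have hFn : ((pvUniq p).filter (fun x => (pvUniq s).contains x))[n] = seg'[n] := by
        have := congrArg (fun l => l[n]?) htk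
        simp only [List.getElem?_take, hn, if_pos hn] at this
        rw [List.getElem?_eq_getElem hnS, List.getElem?_eq_getElem hn] at this
        exact (Option.some.inj this).symm
      rw [List.getElem_take, List.getElem_map, hixB, hFn, hseg]
      exact (pvFindKey_spec (uE s) hsndnodup q hq).symm
  -- B's components
  have hia : ((PySem.List.enumerate p 0).filter
      (fun q => (PySem.Dict.counter p).getD q.2 0 == 1)) = uE p :=
    List.filter_congr (fun q _ => counter_pred p q.2)
  have hpos2 : ∀ q ∈ uE s,
      ((PySem.List.enumerate s 0).foldl
        (fun d q => if s.count q.2 == 1 then d.insert q.2 q.1 else d)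
        PySem.Dict.empty).getD q.2 0 = q.1 := by
    intro q hq
    rw [foldl_if_insert]
    exact getD_fold_insert_mem (uE s) PySem.Dict.empty q hq hsndnodup
  have hfeq : ∀ q ∈ uE p,
      ((fun i => if (PySem.Dict.counter s).getD ((PySem.List.pyGet? p i).getD 0) 0 == 1
          then some (((PySem.List.enumerate s 0).foldl
            (fun d q => if (PySem.Dict.counter s).getD q.2 0 == 1 then d.insert q.2 q.1 else d)
            PySem.Dict.empty).getD ((PySem.List.pyGet? p i).getD 0) 0)
          else none) ∘ (fun (r : Int × Int) => r.1)) q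
      = (if s.count q.2 == 1 then some (pvFindKey (uE s) q.2) else none) := by
    intro q hq
    simp only [Function.comp, uE_get p q hq, counter_pred]
    by_cases hc : (s.count q.2 == 1) = true
    · rw [if_pos hc, if_pos hc]
      have hmem : q.2 ∈ (uE s).map Prod.snd := by
        rw [pvUniq_eq, pvUniq_mem]
        simpa using hc
      obtain ⟨q', hq', hq'e⟩ := List.mem_map.mp hmem
      rw [← hq'e, hpos2 q' hq', pvFindKey_spec (uE s) hsndnodup q' hq']
    · rw [if_neg hc, if_neg hc]
  have hFm : ((pvUniq p).filter (fun x => (pvUniq s).contains x))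
      = ((uE p).filter (fun q => s.count q.2 == 1)).map Prod.snd := by
    rw [← pvUniq_eq p, List.filter_map]
    congr 1
    apply List.filter_congr
    intro q _
    rw [Bool.eq_iff_iff]
    simp only [Function.comp, List.contains_iff_mem, beq_iff_eq]
    rw [pvUniq_mem]
  have hib : (((PySem.List.enumerate p 0).filter
        (fun q => (PySem.Dict.counter p).getD q.2 0 == 1)).map (·.1)).filterMap
        (fun i => if (PySem.Dict.counter s).getD ((PySem.List.pyGet? p i).getD 0) 0 == 1
          then some (((PySem.List.enumerate s 0).foldl
            (fun d q => if (PySem.Dict.counter s).getD q.2 0 == 1 then d.insert q.2 q.1 else d)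
            PySem.Dict.empty).getD ((PySem.List.pyGet? p i).getD 0) 0)
          else none)
      = ((pvUniq p).filter (fun x => (pvUniq s).contains x)).map (pvFindKey (uE s)) := by
    rw [hia, List.filterMap_map, List.filterMap_congr hfeq, filterMap_pair_if, hFm, List.map_map]
    rfl
  have hkk : pvK p s = ((pvUniq p).filter (fun x => (pvUniq s).contains x)).length := rfl
  constructor
  · -- agreement outside D_
    intro hD
    rw [devolveUnicos, devolveUnicos_alt]
    simp only [hrd1, hrd2, heq, hib, hia]
    by_cases hk : 1 < ((pvUniq p).filter (fun x => (pvUniq s).contains x)).length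
    · have hg : 0 < (pvUniq p).length ∧ 0 < (pvUniq s).length := ⟨by omega, by omega⟩
      have hb1 : 1 < (((pvUniq p).filter (fun x => (pvUniq s).contains x)).map
          (pvFindKey (uE s))).length := by rw [List.length_map]; omega
      rw [if_pos hg, if_pos hk, if_pos hb1]
      have hne : ¬ (((pvUniq p).filter (fun x => (pvUniq s).contains x)).length + 1
          = (pvUniq s).length) := by
        intro hcontra
        exact hD ⟨by omega, by rw [hkk]; omega⟩
      rcases Nat.lt_or_ge (((pvUniq p).filter (fun x => (pvUniq s).contains x)).length + 1)
          (pvUniq s).length with hlt | hge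
      · have htr : ((((pvUniq p).filter (fun x => (pvUniq s).contains x)).length : Int)
            < (seg'.length : Int) - 1) := by rw [hlenS]; push_cast; omega
        rw [if_pos htr, hC1]
      · have hkeq : ((pvUniq p).filter (fun x => (pvUniq s).contains x)).length
            = (pvUniq s).length := by omega
        have htr : ¬ ((((pvUniq p).filter (fun x => (pvUniq s).contains x)).length : Int)
            < (seg'.length : Int) - 1) := by rw [hlenS]; push_cast; omega
        rw [if_neg htr]
        rw [show ixB' = ixB'.take ((pvUniq p).filter (fun x => (pvUniq s).contains x)).length by
          rw [List.take_of_length_le (by omega)]]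
        rw [hC1]
    · have hknot : ¬ 1 < (((pvUniq p).filter (fun x => (pvUniq s).contains x)).map
          (pvFindKey (uE s))).length := by rw [List.length_map]; omega
      rw [if_neg hknot]
      by_cases hg : 0 < (pvUniq p).length ∧ 0 < (pvUniq s).length
      · rw [if_pos hg, if_neg hk]
      · rw [if_neg hg]
  · -- difference inside D_
    intro hD heqAB
    obtain ⟨hD1, hD2⟩ := hD
    rw [hkk] at hD1 hD2
    rw [devolveUnicos, devolveUnicos_alt] at heqAB
    simp only [hrd1, hrd2, heq, hib, hia] at heqAB
    have hg : 0 < (pvUniq p).length ∧ 0 < (pvUniq s).length := ⟨by omega, by omega⟩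
    have hb1 : 1 < (((pvUniq p).filter (fun x => (pvUniq s).contains x)).map
        (pvFindKey (uE s))).length := by rw [List.length_map]; omega
    have htr : ¬ ((((pvUniq p).filter (fun x => (pvUniq s).contains x)).length : Int)
        < (seg'.length : Int) - 1) := by rw [hlenS]; push_cast; omega
    rw [if_pos hg, if_pos (by omega : 1 < ((pvUniq p).filter
        (fun x => (pvUniq s).contains x)).length), if_pos hb1, if_neg htr] at heqAB
    have hpair := Option.some.inj heqAB
    have hsnd := congrArg Prod.snd hpair
    have hlens := congrArg List.length hsnd
    simp only [List.length_map] at hlens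
    rw [hlenB] at hlens
    omega

-- ===== VERDICT (by name: the statement is the Claim_ definition above) =====
theorem devolveUnicos_spec : Claim_unchanged_devolveUnicos := by
  intro p s _ hD; exact (devolveUnicos_main p s).1 hD

theorem devolveUnicos_changed : Claim_changed_devolveUnicos := by
  unfold Claim_changed_devolveUnicos; decide

theorem devolveUnicos_tight : Claim_exact_devolveUnicos := by
  intro p s _ hD; exact (devolveUnicos_main p s).2 hD
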